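-- pv_equiv track=rewrite | github.com/Raght/2SHIPS | Older Versions/2SHIPS Singleplayer.py | does_collide
-- ===== SOURCE A (Python) =====
-- def does_collide(missile, object2):
--     hitboxes1 = set()
--     hitboxes1.add((missile[0], missile[1]))
--     hitboxes1.add((missile[0], missile[1] + missile[3]))
--     hitboxes1.add((missile[0] + missile[2], missile[1]))
--     hitboxes1.add((missile[0] + missile[2], missile[1] + missile[3]))
--
--     hitboxes2 = set()
--     for x in range(0, object2[2]):
--         for y in range(0, object2[3]):
--             hitboxes2.add((object2[0] + x, object2[1] + y))
--
--     for hit in hitboxes1: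
--         if hit in hitboxes2:
--             return True
--     return False
-- ===== SOURCE B (Python) =====
-- def does_collide(missile, object2):
--     ox, oy, w, h = object2[0], object2[1], object2[2], object2[3]
--     corners = [(missile[0], missile[1]),
--                (missile[0], missile[1] + missile[3]),
--                (missile[0] + missile[2], missile[1]),
--                (missile[0] + missile[2], missile[1] + missile[3])]
--     return any(ox <= cx < ox + w and oy <= cy < oy + h for cx, cy in corners)
-- ===== Notes on version B (the rewrite author's own statement) =====
-- stated objective: faster
-- what changed: B tests each of the 4 missile corners directly against the object's rectangle bounds with range comparisons instead of materialising the set of all w*h rectangle cells and probing it.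
-- outside the precondition, e.g. on does_collide([8, 0, 2, 0, 7, -2579], [3, 4, -1]): A returns False, B raises IndexError
import Mathlib
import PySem

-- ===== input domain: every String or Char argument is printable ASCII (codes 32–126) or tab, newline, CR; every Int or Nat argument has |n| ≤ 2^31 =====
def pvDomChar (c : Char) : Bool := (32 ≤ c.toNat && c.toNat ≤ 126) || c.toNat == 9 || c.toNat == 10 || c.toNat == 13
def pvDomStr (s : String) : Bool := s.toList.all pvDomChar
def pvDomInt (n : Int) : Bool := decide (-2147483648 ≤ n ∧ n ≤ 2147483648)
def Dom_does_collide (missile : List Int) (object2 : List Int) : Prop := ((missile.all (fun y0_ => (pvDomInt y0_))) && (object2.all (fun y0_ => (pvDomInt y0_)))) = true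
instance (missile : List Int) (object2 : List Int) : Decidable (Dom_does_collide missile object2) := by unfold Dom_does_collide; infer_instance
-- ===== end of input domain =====

-- B replaces A's materialised set of all w*h rectangle cells by direct range
-- comparisons of the 4 corner points against the rectangle bounds (objective: faster).

-- ===== PORT A =====
-- Indexing uses pyGetD with default 0; Pre_ guarantees the indices 0..3 are in range,
-- so the default is never used. The final 'for hit in hitboxes1' loop with early
-- return is ported as .any — order-independent, so exact despite Python's hash order.
def does_collide (missile : List Int) (object2 : List Int) : Bool :=
  let m0 := PySem.List.pyGetD missile 0 0
  let m1 := PySem.List.pyGetD missile 1 0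
  let m2 := PySem.List.pyGetD missile 2 0
  let m3 := PySem.List.pyGetD missile 3 0
  let hitboxes1 : PySem.Set (Int × Int) :=
    PySem.Set.add (PySem.Set.add (PySem.Set.add (PySem.Set.add PySem.Set.empty
      (m0, m1)) (m0, m1 + m3)) (m0 + m2, m1)) (m0 + m2, m1 + m3)
  let o0 := PySem.List.pyGetD object2 0 0
  let o1 := PySem.List.pyGetD object2 1 0
  let o2 := PySem.List.pyGetD object2 2 0
  let o3 := PySem.List.pyGetD object2 3 0
  let hitboxes2 : PySem.Set (Int × Int) :=
    (PySem.List.pyRange 0 o2 1).foldl (fun s x =>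
      (PySem.List.pyRange 0 o3 1).foldl (fun s y =>
        PySem.Set.add s (o0 + x, o1 + y)) s) PySem.Set.empty
  hitboxes1.any (fun hit => PySem.Set.contains hitboxes2 hit)

-- ===== PORT B =====
def does_collide_alt (missile : List Int) (object2 : List Int) : Bool :=
  let ox := PySem.List.pyGetD object2 0 0
  let oy := PySem.List.pyGetD object2 1 0
  let w  := PySem.List.pyGetD object2 2 0
  let h  := PySem.List.pyGetD object2 3 0
  let corners : List (Int × Int) :=
    [(PySem.List.pyGetD missile 0 0, PySem.List.pyGetD missile 1 0),
     (PySem.List.pyGetD missile 0 0, PySem.List.pyGetD missile 1 0 + PySem.List.pyGetD missile 3 0),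
     (PySem.List.pyGetD missile 0 0 + PySem.List.pyGetD missile 2 0, PySem.List.pyGetD missile 1 0),
     (PySem.List.pyGetD missile 0 0 + PySem.List.pyGetD missile 2 0, PySem.List.pyGetD missile 1 0 + PySem.List.pyGetD missile 3 0)]
  corners.any (fun c =>
    decide (ox ≤ c.1) && decide (c.1 < ox + w) && decide (oy ≤ c.2) && decide (c.2 < oy + h))

-- ===== PRECONDITION & SPEC =====
-- Pre_ excludes inputs where either Python raises IndexError (lists shorter than 4), and
-- also the corner where object2 has exactly 3 elements with object2[2] <= 0: there A's empty
-- loop never reads object2[3] and returns False, while B reads all four fields and raises.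
def Pre_does_collide (missile : List Int) (object2 : List Int) : Prop :=
  4 ≤ missile.length ∧ 4 ≤ object2.length
instance (missile : List Int) (object2 : List Int) : Decidable (Pre_does_collide missile object2) := by
  unfold Pre_does_collide; infer_instance

def pvWitness_does_collide : List Int × List Int := ([0, 0, 2, 2], [1, 1, 3, 3])

def Spec_does_collide (missile : List Int) (object2 : List Int) (out : Bool) : Prop := out = does_collide_alt missile object2
instance (missile : List Int) (object2 : List Int) (out : Bool) : Decidable (Spec_does_collide missile object2 out) := by unfold Spec_does_collide; infer_instance

-- ===== CLAIM (what is proved, stated in full; the proofs are below) =====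
def Claim_equal_does_collide : Prop := ∀ (missile : List Int) (object2 : List Int), Dom_does_collide missile object2 → Pre_does_collide missile object2 → Spec_does_collide missile object2 (does_collide missile object2)

-- ===== LEMMAS AND PROOFS =====

-- Generic: membership through a fold whose step satisfies a pointwise membership law.
theorem mem_foldl_of_step {α β : Type} (g : List α → β → List α) (Q : β → Prop) (p : α)
    (hg : ∀ (s : List α) (x : β), p ∈ g s x ↔ p ∈ s ∨ Q x) :
    ∀ (l : List β) (s : List α),
      p ∈ l.foldl g s ↔ p ∈ s ∨ ∃ x ∈ l, Q x := by
  intro l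
  induction l with
  | nil => simp
  | cons x xs ih =>
    intro s
    simp only [List.foldl_cons, ih, hg, List.mem_cons]
    constructor
    · rintro ((h | h) | ⟨y, hy, hQ⟩)
      · exact Or.inl h
      · exact Or.inr ⟨x, Or.inl rfl, h⟩
      · exact Or.inr ⟨y, Or.inr hy, hQ⟩
    · rintro (h | ⟨y, rfl | hy, hQ⟩)
      · exact Or.inl (Or.inl h)
      · exact Or.inl (Or.inr hQ)
      · exact Or.inr ⟨y, hy, hQ⟩

-- Membership in the nested-fold cell set = the rectangle bound conditions.
theorem mem_rect_fold (o0 o1 o2 o3 : Int) (s : PySem.Set (Int × Int)) (p : Int × Int) :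
    p ∈ (PySem.List.pyRange 0 o2 1).foldl (fun s x =>
      (PySem.List.pyRange 0 o3 1).foldl (fun s y =>
        PySem.Set.add s (o0 + x, o1 + y)) s) s ↔
    p ∈ s ∨ (o0 ≤ p.1 ∧ p.1 < o0 + o2 ∧ o1 ≤ p.2 ∧ p.2 < o1 + o3) := by
  rw [mem_foldl_of_step _ (fun x => ∃ y ∈ PySem.List.pyRange 0 o3 1, p = (o0 + x, o1 + y)) p
      (fun s x => PySem.Set.mem_foldl_add _ _ s p)]
  simp only [PySem.List.mem_pyRange_one, Prod.ext_iff]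
  constructor
  · rintro (h | ⟨x, hx, y, hy, h1, h2⟩)
    · exact Or.inl h
    · exact Or.inr (by omega)
  · rintro (h | h)
    · exact Or.inl h
    · exact Or.inr ⟨p.1 - o0, by omega, p.2 - o1, by omega, by omega, by omega⟩

theorem does_collide_spec : Claim_equal_does_collide := by
  intro missile object2 _ _
  unfold Spec_does_collide does_collide does_collide_alt
  rw [Bool.eq_iff_iff]
  simp only [List.any_eq_true, PySem.Set.contains_iff, PySem.Set.mem_add,
    mem_rect_fold, List.mem_cons, List.not_mem_nil, Bool.and_eq_true, decide_eq_true_eq]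
  constructor
  · rintro ⟨c, hc, hmem⟩
    rcases hmem with hmem | hb
    · simp [PySem.Set.empty] at hmem
    · exact ⟨c, by tauto, by tauto⟩
  · rintro ⟨c, hc, hb⟩
    exact ⟨c, by tauto, Or.inr (by tauto)⟩
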